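-- pv_equiv track=rewrite | github.com/IgorKikola/ChessManagement | chessManagement/match_scheduler.py | assign_to_pairs
-- ===== SOURCE A (Python) =====
-- def assign_to_pairs(players):
--     pairs = []
--     i = 0
--     l = len(players)
--     if l % 2 == 0:
--         while i < l:
--             pairs.append((players[i], players[i + 1]))
--             i = i + 2
--     return pairs
-- ===== SOURCE B (Python) =====
-- def assign_to_pairs(players):
--     if len(players) % 2 != 0:
--         return []
--     return list(zip(players[0::2], players[1::2]))
-- ===== Notes on version B (the rewrite author's own statement) =====
-- stated objective: idiomatic
-- what changed: Replaced the manual index-stepping while loop with a guard plus zip of the two stride-2 slices players[0::2] and players[1::2].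
import Mathlib
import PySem

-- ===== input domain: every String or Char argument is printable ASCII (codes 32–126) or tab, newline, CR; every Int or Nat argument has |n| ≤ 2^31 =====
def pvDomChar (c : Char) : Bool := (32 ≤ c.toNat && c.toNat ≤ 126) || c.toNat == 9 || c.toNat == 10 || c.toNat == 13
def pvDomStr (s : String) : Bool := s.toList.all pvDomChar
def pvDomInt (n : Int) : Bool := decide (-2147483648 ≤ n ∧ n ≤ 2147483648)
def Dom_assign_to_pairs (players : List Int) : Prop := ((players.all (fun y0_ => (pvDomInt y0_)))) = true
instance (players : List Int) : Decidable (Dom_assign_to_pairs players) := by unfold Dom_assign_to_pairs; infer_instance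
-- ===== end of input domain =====

-- B replaces A's index-stepping while loop with a guard plus zip of the two stride-2 slices (idiomatic; same O(n) cost).
-- ===== PORT A =====
-- the 'while i < l' loop of A: appends (players[i], players[i+1]) and steps i by 2
def assignLoop (players : List Int) (i : Nat) (pairs : List (Int × Int)) : List (Int × Int) :=
  if i < players.length then
    assignLoop players (i + 2) (pairs ++ [(players.getD i 0, players.getD (i + 1) 0)])
  else pairs
  termination_by players.length - i

def assign_to_pairs (players : List Int) : List (Int × Int) :=
  if players.length % 2 == 0 then assignLoop players 0 [] else []

-- ===== PORT B =====
-- xs[0::2] / xs[1::2]: stride-2 slice (to take xs[1::2], apply to xs.drop 1)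
def everyOther : List Int → List Int
  | [] => []
  | [x] => [x]
  | x :: _ :: rest => x :: everyOther rest

def assign_to_pairs_alt (players : List Int) : List (Int × Int) :=
  if players.length % 2 != 0 then []
  else (everyOther players).zip (everyOther (players.drop 1))

-- ===== PRECONDITION & SPEC =====
def Spec_assign_to_pairs (players : List Int) (out : List (Int × Int)) : Prop := out = assign_to_pairs_alt players
instance (players : List Int) (out : List (Int × Int)) : Decidable (Spec_assign_to_pairs players out) := by unfold Spec_assign_to_pairs; infer_instance

-- ===== CLAIM (what is proved, stated in full; the proofs are below) =====
def Claim_equal_assign_to_pairs : Prop := ∀ (players : List Int), Dom_assign_to_pairs players → Spec_assign_to_pairs players (assign_to_pairs players)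

-- ===== LEMMAS AND PROOFS =====


theorem assignLoop_eq (players : List Int) (i : Nat)
    (h : (players.length - i) % 2 = 0) (pairs : List (Int × Int)) :
    assignLoop players i pairs =
      pairs ++ ((everyOther (players.drop i)).zip (everyOther (players.drop (i + 1)))) := by
  by_cases hi : i < players.length
  · have h1 : i + 1 < players.length := by omega
    rw [assignLoop, if_pos hi]
    rw [assignLoop_eq players (i + 2) (by omega)]
    have d0 : players.drop i = players[i] :: players.drop (i + 1) :=
      List.drop_eq_getElem_cons hi
    have d1 : players.drop (i + 1) = players[i + 1] :: players.drop (i + 1 + 1) :=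
      List.drop_eq_getElem_cons h1
    have g0 : players.getD i 0 = players[i] := List.getD_eq_getElem players 0 hi
    have g1 : players.getD (i + 1) 0 = players[i + 1] := List.getD_eq_getElem players 0 h1
    rw [d0, d1, g0, g1]
    rcases h2 : players.drop (i + 1 + 1) with _ | ⟨c, rest⟩
    · have e3 : players.drop (i + 2 + 1) = [] := by
        have hle : players.length ≤ i + 1 + 1 := by
          by_contra hlt
          rw [List.drop_eq_getElem_cons (by omega : i + 1 + 1 < players.length)] at h2
          simp at h2
          omega
        exact List.drop_eq_nil_of_le (by omega)
      have e2 : players.drop (i + 2) = [] := by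
        have : i + 1 + 1 = i + 2 := rfl
        rw [← this]; exact h2
      simp [e3, everyOther]
    · have e2 : players.drop (i + 2) = c :: rest := h2
      have hlt : i + 1 + 1 < players.length := by
        by_contra hge
        rw [List.drop_eq_nil_of_le (by omega)] at h2
        simp at h2
      have e3 : players.drop (i + 2 + 1) = rest := by
        have hd := List.drop_eq_getElem_cons hlt
        rw [h2] at hd
        simpa using ((List.cons.injEq _ _ _ _).mp hd.symm).2
      simp [e3, everyOther, List.zip]
  · rw [assignLoop, if_neg hi]
    have e0 : players.drop i = [] := List.drop_eq_nil_of_le (by omega)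
    have e1 : players.drop (i + 1) = [] := List.drop_eq_nil_of_le (by omega)
    simp [e0, e1, everyOther]
  termination_by players.length - i

theorem assign_to_pairs_spec : Claim_equal_assign_to_pairs := by
  intro players _
  unfold Spec_assign_to_pairs assign_to_pairs assign_to_pairs_alt
  by_cases h : players.length % 2 = 0
  · simp only [h, beq_self_eq_true, if_pos]
    rw [assignLoop_eq players 0 (by omega)]
    simp
  · have : (players.length % 2 == 0) = false := by simp [h]
    simp [this, bne]
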